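-- pv_equiv track=rewrite | github.com/Muntasir-Arin/bracu-advising-assistant-v1 | program.py | week_main
-- ===== SOURCE A (Python) =====
-- def day_calc(arr):
--     new_arr = sorted(arr)
--     total = 0
--     for i in range(len(new_arr)-1):
--         f= (new_arr[i+1]-new_arr[i])*2
--         if f ==0:
--             total+= 100000
--             break
--         else:
--             total+= f
--     return total
--
-- def week_calc(dict):
--     total = 0
--     for i in dict.values():
--         total+= day_calc(i)+7
--     return total
--
-- def week_main(arr):
--     dict1= {}
--     for i in arr:
--         if i//100000!= 0 :
--             if 6 not in dict1:
--                 dict1[6]=[]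
--             dict1[6]+= [i//100000]
--         elif i//10000!= 0 :
--             if 5 not in dict1:
--                 dict1[5]=[]
--             dict1[5]+= [i//10000]
--         elif i//1000!= 0 :
--             if 4 not in dict1:
--                 dict1[4]=[]
--             dict1[4]+= [i//1000]
--         elif i//100!= 0 :
--             if 3 not in dict1:
--                 dict1[3]=[]
--             dict1[3]+= [i//100]
--         elif i//10!= 0 :
--             if 2 not in dict1:
--                 dict1[2]=[]
--             dict1[2]+= [i//10]
--         else :
--             if 1 not in dict1:
--                 dict1[1]=[]
--             dict1[1]+= [i]
--
--     return week_calc(dict1)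
-- ===== SOURCE B (Python) =====
-- # One pass without sorting: per bucket keep (min, max, seen-set, smallest duplicate);
-- # the sorted-gap sum telescopes to 2*(max-min), or 2*(mindup-min)+100000 when a gap is zero.
-- def week_main(arr):
--     stats = {}
--     for i in arr:
--         for k, d in ((6, 100000), (5, 10000), (4, 1000), (3, 100), (2, 10)):
--             v = i // d
--             if v != 0:
--                 break
--         else:
--             k, v = 1, i
--         if k in stats:
--             mn, mx, seen, mindup = stats[k]
--             if v in seen:
--                 if mindup is None or v < mindup:
--                     mindup = v
--             else:
--                 seen.add(v)
--             stats[k] = (min(mn, v), max(mx, v), seen, mindup)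
--         else:
--             stats[k] = (v, v, {v}, None)
--     total = 0
--     for mn, mx, seen, mindup in stats.values():
--         if mindup is None:
--             total += 2 * (mx - mn) + 7
--         else:
--             total += 2 * (mindup - mn) + 100007
--     return total
-- ===== Notes on version B (the rewrite author's own statement) =====
-- stated objective: alternative
-- what changed: Instead of sorting each bucket and summing consecutive gaps, B keeps per-bucket min, max, a seen-set and the smallest duplicated value in one pass, using that the sorted-gap sum telescopes to 2*(max-min), or 2*(mindup-min)+100000 when a zero gap occurs.
import Mathlib
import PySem

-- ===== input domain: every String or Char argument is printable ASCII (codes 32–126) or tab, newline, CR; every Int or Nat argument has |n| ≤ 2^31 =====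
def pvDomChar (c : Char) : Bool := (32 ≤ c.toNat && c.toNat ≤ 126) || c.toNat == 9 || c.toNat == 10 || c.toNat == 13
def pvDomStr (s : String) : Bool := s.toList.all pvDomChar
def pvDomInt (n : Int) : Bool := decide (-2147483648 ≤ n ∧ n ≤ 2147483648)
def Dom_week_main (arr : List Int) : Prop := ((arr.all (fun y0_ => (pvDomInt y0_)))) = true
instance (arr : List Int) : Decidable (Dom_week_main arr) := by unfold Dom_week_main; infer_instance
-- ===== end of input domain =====

-- B replaces A's per-bucket sort-and-scan by a one-pass min/max/smallest-duplicate computation (objective: alternative algorithm, no sorting).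

-- ===== PORT A =====
-- day_calc's loop over consecutive sorted pairs; stopping the recursion = the break
def pvDayLoop : Int → List Int → Int
  | _, [] => 0
  | prev, x :: xs => if (x - prev) * 2 = 0 then 100000 else (x - prev) * 2 + pvDayLoop x xs

def day_calc (arr : List Int) : Int :=
  match PySem.List.sorted arr (fun x => x) false with
  | [] => 0
  | h :: t => pvDayLoop h t

def week_calc (d : PySem.Dict Int (List Int)) : Int :=
  d.values.foldl (fun total l => total + (day_calc l + 7)) 0

-- the branch body A repeats six times: "if k not in dict1: dict1[k] = []; dict1[k] += [v]"
def pvBucketStep (d : PySem.Dict Int (List Int)) (k v : Int) : PySem.Dict Int (List Int) :=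
  let d1 := if d.contains k then d else d.insert k []
  d1.insert k (d1.getD k [] ++ [v])

def pvWeekStep (d : PySem.Dict Int (List Int)) (i : Int) : PySem.Dict Int (List Int) :=
  if PySem.Int.floordiv i 100000 ≠ 0 then pvBucketStep d 6 (PySem.Int.floordiv i 100000)
  else if PySem.Int.floordiv i 10000 ≠ 0 then pvBucketStep d 5 (PySem.Int.floordiv i 10000)
  else if PySem.Int.floordiv i 1000 ≠ 0 then pvBucketStep d 4 (PySem.Int.floordiv i 1000)
  else if PySem.Int.floordiv i 100 ≠ 0 then pvBucketStep d 3 (PySem.Int.floordiv i 100)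
  else if PySem.Int.floordiv i 10 ≠ 0 then pvBucketStep d 2 (PySem.Int.floordiv i 10)
  else pvBucketStep d 1 i

def week_main (arr : List Int) : Int :=
  week_calc (arr.foldl pvWeekStep PySem.Dict.empty)

-- ===== PORT B =====
-- per-bucket running statistics: (min, max, seen values, smallest duplicated value)
def pvStats : Type := Int × Int × PySem.Set Int × Option Int

def pvDivisors : List (Int × Int) := [(6, 100000), (5, 10000), (4, 1000), (3, 100), (2, 10)]

-- the inner "for k, d in …: if i//d != 0: break / else: k, v = 1, i"
def pvKeyval : Int → List (Int × Int) → Int × Int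
  | i, [] => (1, i)
  | i, (k, d) :: rest =>
    let v := PySem.Int.floordiv i d
    if v ≠ 0 then (k, v) else pvKeyval i rest

def pvUpdStats (s : pvStats) (v : Int) : pvStats :=
  match s with
  | (mn, mx, seen, md) =>
    if PySem.Set.contains seen v then
      (min mn v, max mx v, seen,
        match md with
        | none => some v
        | some m => if v < m then some v else some m)
    else (min mn v, max mx v, PySem.Set.add seen v, md)

def pvAltStep (st : PySem.Dict Int pvStats) (i : Int) : PySem.Dict Int pvStats :=
  let kv := pvKeyval i pvDivisors
  if st.contains kv.1 then
    st.insert kv.1 (pvUpdStats (st.getD kv.1 (0, 0, PySem.Set.empty, none)) kv.2)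
  else
    st.insert kv.1 (kv.2, kv.2, PySem.Set.add PySem.Set.empty kv.2, none)

def pvFormula (s : pvStats) : Int :=
  match s.2.2.2 with
  | none => 2 * (s.2.1 - s.1) + 7
  | some md => 2 * (md - s.1) + 100007

def week_main_alt (arr : List Int) : Int :=
  (arr.foldl pvAltStep PySem.Dict.empty).values.foldl (fun t s => t + pvFormula s) 0

-- ===== PRECONDITION & SPEC =====
def Spec_week_main (arr : List Int) (out : Int) : Prop := out = week_main_alt arr
instance (arr : List Int) (out : Int) : Decidable (Spec_week_main arr out) := by unfold Spec_week_main; infer_instance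

-- ===== CLAIM (what is proved, stated in full; the proofs are below) =====
def Claim_equal_week_main : Prop := ∀ (arr : List Int), Dom_week_main arr → Spec_week_main arr (week_main arr)

-- ===== LEMMAS AND PROOFS =====

-- the stats B maintains for a bucket, as a function of the bucket's list
def pvForce : List Int → pvStats
  | [] => (0, 0, PySem.Set.empty, none)
  | h :: t => t.foldl pvUpdStats (h, h, PySem.Set.add PySem.Set.empty h, none)

-- first element of an adjacent equal pair (in a sorted list: the smallest duplicate)
def pvFirstDup : List Int → Option Int
  | [] => none
  | [_] => none
  | a :: b :: r => if a = b then some a else pvFirstDup (b :: r)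

def pvStatsInv (l : List Int) (s : pvStats) : Prop :=
  s.1 ∈ l ∧ (∀ x ∈ l, s.1 ≤ x) ∧ s.2.1 ∈ l ∧ (∀ x ∈ l, x ≤ s.2.1) ∧
  (∀ x, x ∈ s.2.2.1 ↔ x ∈ l) ∧
  (match s.2.2.2 with
   | none => ∀ x, l.count x ≤ 1
   | some m => 2 ≤ l.count m ∧ ∀ x, 2 ≤ l.count x → m ≤ x)

def pvDictInv (dA : PySem.Dict Int (List Int)) (dB : PySem.Dict Int pvStats) : Prop :=
  dB.items = dA.items.map (fun p => (p.1, pvForce p.2)) ∧ dA.keys.Nodup ∧ ∀ p ∈ dA.items, p.2 ≠ []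

theorem pvDayLoop_char (t : List Int) : ∀ h : Int, (h :: t).Pairwise (· ≤ ·) →
    pvDayLoop h t = (match pvFirstDup (h :: t) with
      | some d => 2 * (d - h) + 100000
      | none => 2 * ((h :: t).getLast (by simp) - h)) := by
  induction t with
  | nil => intro h _; simp [pvDayLoop, pvFirstDup]
  | cons x xs ih =>
    intro h hp
    rw [List.pairwise_cons] at hp
    obtain ⟨hle, hp'⟩ := hp
    by_cases hx : h = x
    · subst hx
      simp [pvDayLoop, pvFirstDup]
    · have hne : (x - h) * 2 ≠ 0 := by
        have : h ≤ x := hle x (by simp)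
        intro hc; apply hx; omega
      have := ih x hp'
      simp only [pvDayLoop, if_neg hne, this, pvFirstDup, if_neg hx]
      cases hfd : pvFirstDup (x :: xs) with
      | some d => simp; ring
      | none =>
        have : (h :: x :: xs).getLast (by simp) = (x :: xs).getLast (by simp) := by
          simp [List.getLast_cons]
        rw [this]; ring

theorem pvMem_le_of_pairwise {s : List Int} {a x : Int} (hp : (a :: s).Pairwise (· ≤ ·))
    (hx : x ∈ a :: s) : a ≤ x := by
  rw [List.pairwise_cons] at hp
  rcases hx with _ | hx
  · exact le_refl _
  · exact hp.1 x (by assumption)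

theorem pvFirstDup_count {s : List Int} {d : Int} (h : pvFirstDup s = some d) : 2 ≤ s.count d := by
  induction s with
  | nil => simp [pvFirstDup] at h
  | cons a t ih =>
    cases t with
    | nil => simp [pvFirstDup] at h
    | cons b r =>
      by_cases hab : a = b
      · subst hab
        simp [pvFirstDup] at h
        subst h
        simp [List.count_cons]
      · simp only [pvFirstDup, if_neg hab] at h
        have := ih h
        calc 2 ≤ (b :: r).count d := this
          _ ≤ (a :: b :: r).count d := by simp [List.count_cons]

theorem pvFirstDup_min {s : List Int} {d : Int} (hp : s.Pairwise (· ≤ ·))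
    (h : pvFirstDup s = some d) : ∀ x, 2 ≤ s.count x → d ≤ x := by
  induction s with
  | nil => simp [pvFirstDup] at h
  | cons a t ih =>
    cases t with
    | nil => simp [pvFirstDup] at h
    | cons b r =>
      intro x hx
      by_cases hab : a = b
      · subst hab
        simp [pvFirstDup] at h
        subst h
        exact pvMem_le_of_pairwise hp (List.count_pos_iff.mp (by omega))
      · simp only [pvFirstDup, if_neg hab] at h
        have hp' : (b :: r).Pairwise (· ≤ ·) := (List.pairwise_cons.mp hp).2
        by_cases hxa : x = a
        · subst hxa
          have hmem : x ∈ b :: r := by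
            have : 1 ≤ (b :: r).count x := by
              have := hx; simp [List.count_cons] at this ⊢
              omega
            exact List.count_pos_iff.mp (by omega)
          have h1 : x ≤ b := pvMem_le_of_pairwise hp (by simp)
          have h2 : b ≤ x := pvMem_le_of_pairwise hp' hmem
          omega
        · have : 2 ≤ (b :: r).count x := by
            simp [List.count_cons, show ¬ a = x from fun hh => hxa hh.symm] at hx ⊢; omega
          exact ih hp' h x this

theorem pvFirstDup_none {s : List Int} (hp : s.Pairwise (· ≤ ·))
    (h : pvFirstDup s = none) : ∀ x, s.count x ≤ 1 := by
  induction s with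
  | nil => simp
  | cons a t ih =>
    cases t with
    | nil => simp [List.count_cons]; intro x; split_ifs <;> simp
    | cons b r =>
      intro x
      by_cases hab : a = b
      · simp [pvFirstDup, hab] at h
      · simp only [pvFirstDup, if_neg hab] at h
        have hp' : (b :: r).Pairwise (· ≤ ·) := (List.pairwise_cons.mp hp).2
        have ht := ih hp' h
        by_cases hxa : x = a
        · subst hxa
          have : x ∉ b :: r := by
            intro hmem
            have h1 : x ≤ b := pvMem_le_of_pairwise hp (by simp)
            have h2 : b ≤ x := pvMem_le_of_pairwise hp' hmem
            exact hab (by omega)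
          simp [List.count_cons, List.count_eq_zero_of_not_mem this]
        · have := ht x
          simp [List.count_cons, show ¬ a = x from fun hh => hxa hh.symm] at this ⊢; omega

theorem pvLast_max {s : List Int} (hp : s.Pairwise (· ≤ ·)) (hne : s ≠ []) :
    ∀ y ∈ s, y ≤ s.getLast hne := by
  induction s with
  | nil => simp
  | cons a t ih =>
    intro y hy
    cases t with
    | nil => simp at hy; simp [hy]
    | cons b r =>
      have hp' : (b :: r).Pairwise (· ≤ ·) := (List.pairwise_cons.mp hp).2
      rw [List.getLast_cons (by simp)]
      rcases List.mem_cons.mp hy with rfl | hy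
      · have h1 : b ≤ (b :: r).getLast (by simp) := ih hp' (by simp) b (by simp)
        have hab : y ≤ b := pvMem_le_of_pairwise hp (by simp)
        omega
      · exact ih hp' (by simp) y hy

theorem pvUpd_inv {l : List Int} {s : pvStats} (h : pvStatsInv l s) (v : Int) :
    pvStatsInv (l ++ [v]) (pvUpdStats s v) := by
  obtain ⟨mn, mx, seen, md⟩ := s
  obtain ⟨hmn, hmnle, hmx, hmxle, hseen, hmd⟩ := h
  simp only [pvStatsInv] at *
  have hcnt : ∀ x : Int, (l ++ [v]).count x = l.count x + if v = x then 1 else 0 := by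
    intro x; simp [List.count_append, List.count_singleton]
  by_cases hv : PySem.Set.contains seen v
  · have hvl : v ∈ l := (hseen v).mp (List.mem_of_elem_eq_true hv)
    have hcv : 1 ≤ l.count v := List.count_pos_iff.mpr hvl
    simp only [pvUpdStats, if_pos hv]
    refine ⟨?_, ?_, ?_, ?_, ?_, ?_⟩
    · rcases le_total mn v with h' | h' <;> simp [min_def, h', hmn, hvl]
    · intro x hx
      rcases List.mem_append.mp hx with hx | hx
      · exact le_trans (min_le_left _ _) (hmnle x hx)
      · simp at hx; subst hx; exact min_le_right _ _
    · rcases le_total mx v with h' | h' <;> simp [max_def, h', hmx, hvl]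
    · intro x hx
      rcases List.mem_append.mp hx with hx | hx
      · exact le_trans (hmxle x hx) (le_max_left _ _)
      · simp at hx; subst hx; exact le_max_right _ _
    · intro x
      rw [hseen x]
      constructor
      · intro hx; exact List.mem_append.mpr (Or.inl hx)
      · intro hx
        rcases List.mem_append.mp hx with hx | hx
        · exact hx
        · simp at hx; subst hx; exact hvl
    · cases md with
      | none =>
        refine ⟨?_, ?_⟩
        · rw [hcnt]; simp; omega
        · intro x hx
          rw [hcnt] at hx
          rcases eq_or_ne v x with rfl | hxv
          · omega
          · simp [hxv] at hx
            exfalso; have := hmd x; omega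
      | some m =>
        obtain ⟨hm2, hmmin⟩ := hmd
        by_cases hvm : v < m
        · simp only [if_pos hvm]
          refine ⟨?_, ?_⟩
          · rw [hcnt]; simp; omega
          · intro x hx
            rw [hcnt] at hx
            rcases eq_or_ne v x with rfl | hxv
            · omega
            · simp [hxv] at hx
              have := hmmin x hx; omega
        · simp only [if_neg hvm]
          refine ⟨?_, ?_⟩
          · rw [hcnt]; have := hm2; split_ifs <;> omega
          · intro x hx
            rw [hcnt] at hx
            rcases eq_or_ne v x with rfl | hxv
            · omega
            · simp [hxv] at hx
              exact hmmin x hx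
  · have hvl : v ∉ l := fun hc => hv (List.elem_eq_true_of_mem ((hseen v).mpr hc))
    have hcv : l.count v = 0 := List.count_eq_zero_of_not_mem hvl
    simp only [pvUpdStats, if_neg hv]
    refine ⟨?_, ?_, ?_, ?_, ?_, ?_⟩
    · rcases le_total mn v with h' | h' <;> simp [min_def, h', hmn]
    · intro x hx
      rcases List.mem_append.mp hx with hx | hx
      · exact le_trans (min_le_left _ _) (hmnle x hx)
      · simp at hx; subst hx; exact min_le_right _ _
    · rcases le_total mx v with h' | h' <;> simp [max_def, h', hmx]
    · intro x hx
      rcases List.mem_append.mp hx with hx | hx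
      · exact le_trans (hmxle x hx) (le_max_left _ _)
      · simp at hx; subst hx; exact le_max_right _ _
    · intro x
      rw [PySem.Set.mem_add, hseen x]
      simp [List.mem_append]
    · cases md with
      | none =>
        intro x
        rw [hcnt]
        have := hmd x
        rcases eq_or_ne v x with rfl | hxv
        · simp; omega
        · simp [hxv]; omega
      | some m =>
        obtain ⟨hm2, hmmin⟩ := hmd
        refine ⟨?_, ?_⟩
        · rw [hcnt]; split_ifs <;> omega
        · intro x hx
          rw [hcnt] at hx
          rcases eq_or_ne v x with rfl | hxv
          · rw [if_pos rfl, hcv] at hx; omega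
          · simp [hxv] at hx
            exact hmmin x hx

theorem pvForce_inv (t : List Int) (h : Int) : pvStatsInv (h :: t) (pvForce (h :: t)) := by
  induction t using List.reverseRecOn with
  | nil =>
    refine ⟨by simp [pvForce], ?_, by simp [pvForce], ?_, ?_, ?_⟩
    · intro x hx; simp [pvForce] at hx ⊢; omega
    · intro x hx; simp [pvForce] at hx ⊢; omega
    · intro x; simp [pvForce, PySem.Set.add, PySem.Set.empty]
    · intro x; simp [pvForce, List.count_cons]
      split_ifs <;> simp
  | append_singleton t v ih =>
    have hstep : pvForce (h :: (t ++ [v])) = pvUpdStats (pvForce (h :: t)) v := by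
      simp [pvForce, List.foldl_append]
    rw [hstep]
    have := pvUpd_inv ih v
    simpa using this

theorem pvFormula_force (l : List Int) (hne : l ≠ []) :
    pvFormula (pvForce l) = day_calc l + 7 := by
  obtain ⟨h, t, rfl⟩ := List.exists_cons_of_ne_nil hne
  have hinv := pvForce_inv t h
  -- the sorted list
  have hperm : (PySem.List.sorted (h :: t) (fun x => x) false).Perm (h :: t) :=
    PySem.List.sorted_perm _ _ _
  have hpw : (PySem.List.sorted (h :: t) (fun x => x) false).Pairwise (· ≤ ·) := by
    have := PySem.List.sorted_pairwise (xs := h :: t) (key := fun x => x)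
    simpa using this
  have hsne : PySem.List.sorted (h :: t) (fun x => x) false ≠ [] := by
    simp [PySem.List.sorted_eq_nil_iff]
  obtain ⟨h', t', hs⟩ := List.exists_cons_of_ne_nil hsne
  rw [hs] at hperm hpw
  have hcount : ∀ x : Int, (h' :: t').count x = (h :: t).count x := fun x => hperm.count_eq x
  have hmem : ∀ x : Int, x ∈ h' :: t' ↔ x ∈ h :: t := fun x => hperm.mem_iff
  obtain ⟨hmn, hmnle, hmx, hmxle, hseen, hmd⟩ := hinv
  -- head of sorted = min
  have hh' : h' = (pvForce (h :: t)).1 := by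
    have h1 : (pvForce (h :: t)).1 ≤ h' := hmnle h' ((hmem h').mp (by simp))
    have h2 : h' ≤ (pvForce (h :: t)).1 := by
      have hple : ∀ y ∈ h' :: t', h' ≤ y := by
        intro y hy
        rcases List.mem_cons.mp hy with rfl | hy
        · exact le_refl _
        · exact (List.pairwise_cons.mp hpw).1 y hy
      exact hple _ ((hmem _).mpr hmn)
    omega
  rw [day_calc, hs]
  rw [show (match h' :: t' with | [] => (0:Int) | h :: t => pvDayLoop h t) = pvDayLoop h' t' from rfl,
      pvDayLoop_char t' h' hpw]
  cases hfd : pvFirstDup (h' :: t') with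
  | none =>
    have hcle := pvFirstDup_none hpw hfd
    -- md must be none
    cases hmd' : (pvForce (h :: t)).2.2.2 with
    | some m =>
      rw [hmd'] at hmd
      have := hcle m
      rw [hcount m] at this
      omega
    | none =>
      -- last = max
      have hlast : (h' :: t').getLast (by simp) = (pvForce (h :: t)).2.1 := by
        have h1 : (h' :: t').getLast (by simp) ≤ (pvForce (h :: t)).2.1 :=
          hmxle _ ((hmem _).mp (List.getLast_mem _))
        have h2 : (pvForce (h :: t)).2.1 ≤ (h' :: t').getLast (by simp) :=
          pvLast_max hpw (by simp) _ ((hmem _).mpr hmx)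
        omega
      simp only [pvFormula, hmd']
      rw [← hlast, hh']
  | some d =>
    cases hmd' : (pvForce (h :: t)).2.2.2 with
    | none =>
      rw [hmd'] at hmd
      have h2 := pvFirstDup_count hfd
      have := hmd d
      rw [← hcount d] at this
      omega
    | some m =>
      rw [hmd'] at hmd
      obtain ⟨hm2, hmmin⟩ := hmd
      have hdm : d = m := by
        have h1 : d ≤ m := pvFirstDup_min hpw hfd m (by rw [hcount]; exact hm2)
        have h2 : m ≤ d := hmmin d (by rw [← hcount]; exact pvFirstDup_count hfd)
        omega
      simp only [pvFormula, hmd']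
      rw [hdm, hh']
      ring

theorem pvWeekStep_eq (d : PySem.Dict Int (List Int)) (i : Int) :
    pvWeekStep d i = pvBucketStep d (pvKeyval i pvDivisors).1 (pvKeyval i pvDivisors).2 := by
  simp only [pvWeekStep, pvKeyval, pvDivisors]
  split_ifs <;> rfl

theorem pvStep_preserve (dA : PySem.Dict Int (List Int)) (dB : PySem.Dict Int pvStats) (i : Int)
    (h : pvDictInv dA dB) : pvDictInv (pvWeekStep dA i) (pvAltStep dB i) := by
  obtain ⟨hitems, hnd, hval⟩ := h
  rw [pvWeekStep_eq]
  set k := (pvKeyval i pvDivisors).1 with hk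
  set v := (pvKeyval i pvDivisors).2 with hv
  have hkeys : dB.keys = dA.keys := by
    simp only [PySem.Dict.keys, hitems, List.map_map]
    rfl
  have hndB : dB.keys.Nodup := by rw [hkeys]; exact hnd
  have hcont : dB.contains k = dA.contains k := by
    rw [PySem.Dict.contains_eq_decide_mem_keys, PySem.Dict.contains_eq_decide_mem_keys, hkeys]
  by_cases hc : dA.contains k = true
  · have hsome : (dA.get? k).isSome := by
      rw [← PySem.Dict.contains_eq_isSome_get? dA k]; exact hc
    obtain ⟨old, hold⟩ := Option.isSome_iff_exists.mp hsome
    have holdmem : (k, old) ∈ dA.items := PySem.Dict.mem_items_of_get?_eq_some dA hold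
    have holdne : old ≠ [] := hval _ holdmem
    have hBmem : (k, pvForce old) ∈ dB.items := by
      rw [hitems]
      exact List.mem_map_of_mem holdmem
    have hgB : dB.getD k (0, 0, PySem.Set.empty, none) = pvForce old :=
      PySem.Dict.getD_of_mem_items dB hBmem hndB _
    have hgA : dA.getD k [] = old := PySem.Dict.getD_of_get?_eq_some dA [] hold
    have hupd : pvUpdStats (pvForce old) v = pvForce (old ++ [v]) := by
      obtain ⟨oh, ot, rfl⟩ := List.exists_cons_of_ne_nil holdne
      simp [pvForce, List.foldl_append]
    have hA : pvBucketStep dA k v = dA.insert k (old ++ [v]) := by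
      simp [pvBucketStep, hc, hgA]
    have hB : pvAltStep dB i = dB.insert k (pvForce (old ++ [v])) := by
      simp only [pvAltStep, ← hk, ← hv, hcont, hc, if_pos, hgB, hupd]
    rw [hA, hB]
    refine ⟨?_, ?_, ?_⟩
    · rw [PySem.Dict.items_insert_of_contains dB _ (by rw [hcont]; exact hc),
         PySem.Dict.items_insert_of_contains dA _ hc, hitems, List.map_map, List.map_map]
      apply List.map_congr_left
      intro p _
      by_cases hpk : p.1 == k
      · simp [Function.comp, hpk]
      · simp [Function.comp, hpk]
    · rw [PySem.Dict.keys_insert_of_contains dA _ hc]; exact hnd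
    · intro p hp
      rcases (PySem.Dict.mem_items_insert _ _ _ _).mp hp with rfl | ⟨hp', _⟩
      · simp
      · exact hval _ hp'
  · have hcB : dB.contains k = false := by rw [hcont]; simpa using hc
    have hA : pvBucketStep dA k v = dA.insert k [v] := by
      simp [pvBucketStep, hc, PySem.Dict.getD_insert_self, PySem.Dict.insert_insert_self]
    have hB : pvAltStep dB i = dB.insert k (v, v, PySem.Set.add PySem.Set.empty v, none) := by
      simp only [pvAltStep, ← hk, ← hv, hcB, Bool.false_eq_true, if_false]
    rw [hA, hB]
    refine ⟨?_, ?_, ?_⟩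
    · rw [PySem.Dict.items_insert_of_not_contains dB _ hcB,
         PySem.Dict.items_insert_of_not_contains dA _ (by simpa using hc), hitems, List.map_append]
      rfl
    · rw [PySem.Dict.keys_insert_of_not_contains dA _ (by simpa using hc)]
      rw [List.nodup_append]
      refine ⟨hnd, by simp, ?_⟩
      intro a ha b hbm
      rw [List.mem_singleton] at hbm
      subst hbm
      intro heq
      subst heq
      have hct : dA.contains k = true := by
        rw [PySem.Dict.contains_eq_decide_mem_keys]; simpa using ha
      simp [hct] at hc
    · intro p hp
      rcases (PySem.Dict.mem_items_insert _ _ _ _).mp hp with rfl | ⟨hp', _⟩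
      · simp
      · exact hval _ hp'

theorem pvFold_preserve (arr : List Int) (dA : PySem.Dict Int (List Int))
    (dB : PySem.Dict Int pvStats) (h : pvDictInv dA dB) :
    pvDictInv (arr.foldl pvWeekStep dA) (arr.foldl pvAltStep dB) := by
  induction arr generalizing dA dB with
  | nil => exact h
  | cons i rest ih => exact ih _ _ (pvStep_preserve dA dB i h)

theorem pvSum_eq (its : List (Int × List Int)) (hne : ∀ p ∈ its, p.2 ≠ []) : ∀ t : Int,
    (its.map (fun p => pvForce p.2)).foldl (fun t s => t + pvFormula s) t
      = (its.map (·.2)).foldl (fun t l => t + (day_calc l + 7)) t := by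
  induction its with
  | nil => intro t; rfl
  | cons p rest ih =>
    intro t
    simp only [List.map_cons, List.foldl_cons]
    rw [pvFormula_force p.2 (hne p (by simp))]
    exact ih (fun q hq => hne q (by simp [hq])) _

theorem pvFinal (dA : PySem.Dict Int (List Int)) (dB : PySem.Dict Int pvStats)
    (h : pvDictInv dA dB) :
    week_calc dA = dB.values.foldl (fun t s => t + pvFormula s) 0 := by
  obtain ⟨hitems, _, hval⟩ := h
  unfold week_calc
  simp only [PySem.Dict.values, hitems, List.map_map]
  exact (pvSum_eq dA.items hval 0).symm

-- ===== VERDICT (by name: the statement is the Claim_ definition above) =====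
theorem week_main_spec : Claim_equal_week_main := by
  intro arr _
  unfold Spec_week_main week_main week_main_alt
  exact pvFinal _ _ (pvFold_preserve arr PySem.Dict.empty PySem.Dict.empty
    ⟨rfl, by simp [PySem.Dict.keys_empty], by
      intro p hp
      simp [show (PySem.Dict.empty : PySem.Dict Int (List Int)).items = [] from rfl] at hp⟩)
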